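-- pv_equiv track=rewrite | github.com/FysikRevy/FysikRevyTeX | scripts/tex.py | extract_multiple_lines
-- ===== SOURCE A (Python) =====
-- def extract_multiple_lines(lines, line_number, start_delimiter='{', end_delimiter='}'):
--     "Extract the whole string of a command that spans multiple lines (e.g. \\scene)."
--
--     line = lines[line_number]
--
--     # Find index of start delimiter and instantiate the end index:
--     start_index = line.find(start_delimiter)
--     end_index = 0
--
--     # Get the start of the string, we want to return:
--     string = line[start_index+1:].strip() # strip spaces and newlines
--
--     # Set counters on the number of start and end delimiters (in case there should be a
--     # sub-command like \emph{} within the string, we want to find: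
--     n_start = line.count(start_delimiter)
--     n_end = line.count(end_delimiter)
--
--     line_n = line_number
--
--     while n_start > n_end:
--         line_n += 1
--         line = lines[line_n]
--
--         for i,c in enumerate(line):
--             # Count the number of start and end delimiters, and note the index of any
--             # end delimiter:
--             if c == start_delimiter:
--                 n_start += 1
--             elif c == end_delimiter:
--                 n_end += 1
--                 end_index = i
--
--             if n_start == n_end:
--                 break
--
--     for l in range(line_number+1, line_n):
--         # Strip spaces and newlines, but add a space between the new and past line:
--         string += " " + lines[l].strip()
--
--     # Add the ending:
--     string += lines[line_n][:end_index]
--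
--     return string.strip()
-- ===== SOURCE B (Python) =====
-- def _closing_index(line, depth, start_delimiter, end_delimiter):
--     "Index of the char closing the command at the given nesting depth, or None."
--     for i, c in enumerate(line):
--         if c == start_delimiter:
--             depth += 1
--         elif c == end_delimiter:
--             depth -= 1
--             if depth == 0:
--                 return i
--     return None
--
-- def extract_multiple_lines(lines, line_number, start_delimiter='{', end_delimiter='}'):
--     "Extract the whole string of a command that spans multiple lines (e.g. \\scene)."
--     first = lines[line_number]
--     string = first[first.find(start_delimiter)+1:].strip()
--     depth = first.count(start_delimiter) - first.count(end_delimiter)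
--     n = line_number
--     while depth > 0:
--         n += 1
--         line = lines[n]
--         pos = _closing_index(line, depth, start_delimiter, end_delimiter)
--         if pos is None:
--             depth += sum(c == start_delimiter for c in line) - sum(c == end_delimiter for c in line)
--             string += " " + line.strip()
--         else:
--             string += line[:pos]
--             break
--     return string.strip()
-- ===== Notes on version B (the rewrite author's own statement) =====
-- stated objective: simpler
-- what changed: A scans ahead with two counters to locate the closing line and index, then re-reads and re-joins the middle lines in a second pass; B is a single pass with one depth counter that builds the result string as it goes, with the closing index computed by a per-line helper.
-- outside the precondition, e.g. on extract_multiple_lines(['}a', '{b'], -1, '{', '}'): A returns 'b', B returns 'b'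
import Mathlib
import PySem

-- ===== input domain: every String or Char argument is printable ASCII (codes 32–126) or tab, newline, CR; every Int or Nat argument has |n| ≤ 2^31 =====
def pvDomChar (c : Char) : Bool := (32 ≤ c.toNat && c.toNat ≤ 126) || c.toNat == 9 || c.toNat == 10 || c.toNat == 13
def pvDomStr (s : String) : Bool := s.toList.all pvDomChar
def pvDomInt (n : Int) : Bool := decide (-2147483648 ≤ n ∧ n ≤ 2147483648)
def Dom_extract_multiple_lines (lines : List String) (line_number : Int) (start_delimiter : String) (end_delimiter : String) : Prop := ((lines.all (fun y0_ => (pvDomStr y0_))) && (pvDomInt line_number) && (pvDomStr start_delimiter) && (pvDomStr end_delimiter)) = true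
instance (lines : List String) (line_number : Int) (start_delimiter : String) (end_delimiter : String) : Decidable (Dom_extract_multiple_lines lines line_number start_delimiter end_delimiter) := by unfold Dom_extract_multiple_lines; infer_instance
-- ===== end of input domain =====

-- B replaces A's two passes (scan-ahead with two counters + re-reading the middle lines) by a single
-- pass with one depth counter that builds the string as it goes: objective 'simpler'.

-- ===== PORT A =====
-- inner 'for i,c in enumerate(line)' with its break: state (n_start, n_end, end_index)
def pvScanA (sd ed : List Char) : List Char → Int → Int → Int → Int → Int × Int × Int
  | [], _, ns, ne, ei => (ns, ne, ei)
  | c :: rest, i, ns, ne, ei =>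
    let s' : Int × Int × Int :=
      if [c] = sd then (ns + 1, ne, ei)
      else if [c] = ed then (ns, ne + 1, i)
      else (ns, ne, ei)
    if s'.1 = s'.2.1 then s'
    else pvScanA sd ed rest (i + 1) s'.1 s'.2.1 s'.2.2

-- the 'while n_start > n_end' loop; fuel only makes the recursion total (Python raises IndexError
-- where the fuel could run out, and those inputs are outside Pre_)
def pvLoopA (lines : List (List Char)) (sd ed : List Char) : Nat → Int → Int → Int → Int → Int × Int
  | 0, line_n, _, _, ei => (line_n, ei)
  | fuel + 1, line_n, ns, ne, ei =>
    if ne < ns then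
      let line := (PySem.List.pyGet? lines (line_n + 1)).getD []
      let s := pvScanA sd ed line 0 ns ne ei
      pvLoopA lines sd ed fuel (line_n + 1) s.1 s.2.1 s.2.2
    else (line_n, ei)

def extract_multiple_lines (lines : List String) (line_number : Int) (start_delimiter : String) (end_delimiter : String) : String :=
  let linesC := lines.map String.toList
  let sd := start_delimiter.toList
  let ed := end_delimiter.toList
  let line := (PySem.List.pyGet? linesC line_number).getD []
  let start_index := PySem.Chars.find line sd
  let string0 := PySem.Chars.strip (PySem.Chars.slice line (some (start_index + 1)) none)
  let n_start : Int := (PySem.Chars.count line sd : Int)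
  let n_end : Int := (PySem.Chars.count line ed : Int)
  let r := pvLoopA linesC sd ed linesC.length line_number n_start n_end 0
  let mids := (PySem.List.pyRange (line_number + 1) r.1 1).foldl
    (fun s l => s ++ ' ' :: PySem.Chars.strip ((PySem.List.pyGet? linesC l).getD [])) string0
  String.ofList (PySem.Chars.strip
    (mids ++ PySem.Chars.slice ((PySem.List.pyGet? linesC r.1).getD []) none (some r.2)))

-- ===== PORT B =====
-- helper _closing_index of Source B
def pvClosingIdx (sd ed : List Char) : List Char → Int → Int → Option Int
  | [], _, _ => none
  | c :: rest, i, depth =>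
    if [c] = sd then pvClosingIdx sd ed rest (i + 1) (depth + 1)
    else if [c] = ed then
      if depth - 1 = 0 then some i else pvClosingIdx sd ed rest (i + 1) (depth - 1)
    else pvClosingIdx sd ed rest (i + 1) depth

-- the 'while depth > 0' loop of Source B, accumulating the string; same totality fuel as port A
def pvLoopB (lines : List (List Char)) (sd ed : List Char) : Nat → Int → Int → List Char → List Char
  | 0, _, _, acc => acc
  | fuel + 1, n, depth, acc =>
    if 0 < depth then
      let line := (PySem.List.pyGet? lines (n + 1)).getD []
      match pvClosingIdx sd ed line 0 depth with
      | some j => acc ++ PySem.Chars.slice line none (some j)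
      | none =>
          pvLoopB lines sd ed fuel (n + 1)
            (depth + ((line.countP (fun c => [c] == sd) : Int) - (line.countP (fun c => [c] == ed) : Int)))
            (acc ++ ' ' :: PySem.Chars.strip line)
    else acc

def extract_multiple_lines_alt (lines : List String) (line_number : Int) (start_delimiter : String) (end_delimiter : String) : String :=
  let linesC := lines.map String.toList
  let sd := start_delimiter.toList
  let ed := end_delimiter.toList
  let first := (PySem.List.pyGet? linesC line_number).getD []
  let head := PySem.Chars.strip (PySem.Chars.slice first (some (PySem.Chars.find first sd + 1)) none)
  let depth : Int := (PySem.Chars.count first sd : Int) - (PySem.Chars.count first ed : Int)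
  String.ofList (PySem.Chars.strip (pvLoopB linesC sd ed linesC.length line_number depth head))

-- ===== PRECONDITION & SPEC =====
-- per-character delimiter step (Python compares each char c to the delimiter strings, elif-style)
def pvStep (sd ed : List Char) (c : Char) : Int :=
  if [c] = sd then -1 else if [c] = ed then 1 else 0

def pvBal (sd ed cs : List Char) : Int := (cs.map (pvStep sd ed)).sum

-- Pre_ excludes exactly (a) the inputs on which A raises IndexError: line_number out of range, or
-- the delimiter balance opened on the starting line never closed by the FOLLOWING lines, so the
-- while loop runs off the end of 'lines'; and (b) the accidental corner where a negative
-- line_number's search wraps past index -1 back to line 0 and re-reads earlier lines before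
-- closing — a quirk of Python's negative indexing on which A and B happen to agree, but which no
-- caller would specify.
def Pre_extract_multiple_lines (lines : List String) (line_number : Int) (start_delimiter : String) (end_delimiter : String) : Prop :=
  -(lines.length : Int) ≤ line_number ∧ line_number < lines.length ∧
  (let e := (if line_number < 0 then line_number + lines.length else line_number).toNat
   let line := (lines.map String.toList).getD e []
   let d0 : Int := (PySem.Chars.count line start_delimiter.toList : Int) - (PySem.Chars.count line end_delimiter.toList : Int)
   let rest := ((lines.map String.toList).drop (e + 1)).flatten
   d0 ≤ 0 ∨ ∃ p ∈ List.range (rest.length + 1), d0 ≤ pvBal start_delimiter.toList end_delimiter.toList (rest.take p))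

instance (lines : List String) (line_number : Int) (start_delimiter : String) (end_delimiter : String) : Decidable (Pre_extract_multiple_lines lines line_number start_delimiter end_delimiter) := by unfold Pre_extract_multiple_lines; infer_instance

def pvWitness_extract_multiple_lines : List String × Int × String × String := (["\\scene{Intro", "  mere tekst }x"], 0, "{", "}")

def Spec_extract_multiple_lines (lines : List String) (line_number : Int) (start_delimiter : String) (end_delimiter : String) (out : String) : Prop := out = extract_multiple_lines_alt lines line_number start_delimiter end_delimiter
instance (lines : List String) (line_number : Int) (start_delimiter : String) (end_delimiter : String) (out : String) : Decidable (Spec_extract_multiple_lines lines line_number start_delimiter end_delimiter out) := by unfold Spec_extract_multiple_lines; infer_instance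

-- ===== CLAIM (what is proved, stated in full; the proofs are below) =====
def Claim_equal_extract_multiple_lines : Prop := ∀ (lines : List String) (line_number : Int) (start_delimiter : String) (end_delimiter : String), Dom_extract_multiple_lines lines line_number start_delimiter end_delimiter → Pre_extract_multiple_lines lines line_number start_delimiter end_delimiter → Spec_extract_multiple_lines lines line_number start_delimiter end_delimiter (extract_multiple_lines lines line_number start_delimiter end_delimiter)

-- ===== LEMMAS AND PROOFS =====

-- A's post-loop reassembly of the middle lines
def pvMid (linesC : List (List Char)) (a b : Int) (acc : List Char) : List Char :=
  (PySem.List.pyRange a b 1).foldl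
    (fun s l => s ++ ' ' :: PySem.Chars.strip ((PySem.List.pyGet? linesC l).getD [])) acc

theorem pvBal_countP (sd ed : List Char) (h : sd ≠ ed) (cs : List Char) :
    pvBal sd ed cs = (cs.countP (fun c => [c] == ed) : Int) - (cs.countP (fun c => [c] == sd) : Int) := by
  induction cs with
  | nil => simp [pvBal]
  | cons c cs ih =>
    simp only [pvBal, List.map_cons, List.sum_cons, List.countP_cons, beq_iff_eq] at *
    rw [ih]; unfold pvStep
    by_cases hs : [c] = sd
    · have h2 : ¬ [c] = ed := fun h2 => h (hs ▸ h2 ▸ rfl)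
      simp only [hs, h2, if_true, if_false, decide_true, decide_false, if_neg h]
      push_cast; omega
    · by_cases he : [c] = ed
      · simp only [hs, he, if_true, if_false, decide_true, decide_false, if_neg (Ne.symm h)]
        push_cast; omega
      · simp only [hs, he, if_false, decide_false]
        push_cast; omega



theorem pvBal_append (sd ed cs ds : List Char) :
    pvBal sd ed (cs ++ ds) = pvBal sd ed cs + pvBal sd ed ds := by
  simp [pvBal]

theorem close_none_bal (sd ed : List Char) :
    ∀ (cs : List Char) (i d : Int), 1 ≤ d → pvClosingIdx sd ed cs i d = none →
      ∀ p ≤ cs.length, pvBal sd ed (cs.take p) < d := by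
  intro cs
  induction cs with
  | nil =>
    intro i d hd _ p hp
    have : p = 0 := Nat.le_zero.mp (by simpa using hp)
    subst this; simp [pvBal]; omega
  | cons c cs ih =>
    intro i d hd hnone p hp
    cases p with
    | zero => simp [pvBal]; omega
    | succ p =>
      have hp' : p ≤ cs.length := by simpa using hp
      simp only [List.take_succ_cons, pvBal, List.map_cons, List.sum_cons]
      have hbal : (List.map (pvStep sd ed) (cs.take p)).sum = pvBal sd ed (cs.take p) := rfl
      rw [hbal]
      unfold pvClosingIdx at hnone
      by_cases hs : [c] = sd
      · rw [if_pos hs] at hnone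
        have := ih (i+1) (d+1) (by omega) hnone p hp'
        have hstep : pvStep sd ed c = -1 := by rw [pvStep, if_pos hs]
        rw [hstep]; omega
      · by_cases he : [c] = ed
        · rw [if_neg hs, if_pos he] at hnone
          by_cases hd1 : d - 1 = 0
          · rw [if_pos hd1] at hnone; cases hnone
          · rw [if_neg hd1] at hnone
            have := ih (i+1) (d-1) (by omega) hnone p hp'
            have hstep : pvStep sd ed c = 1 := by rw [pvStep, if_neg hs, if_pos he]
            rw [hstep]; omega
        · rw [if_neg hs, if_neg he] at hnone
          have := ih (i+1) d hd hnone p hp'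
          have hstep : pvStep sd ed c = 0 := by rw [pvStep, if_neg hs, if_neg he]
          rw [hstep]; omega

theorem scan_close (sd ed : List Char) (h : sd ≠ ed) :
    ∀ (cs : List Char) (i ns ne ei : Int), ne < ns →
      (∀ j, pvClosingIdx sd ed cs i (ns - ne) = some j →
        ∃ m, pvScanA sd ed cs i ns ne ei = (m, m, j)) ∧
      (pvClosingIdx sd ed cs i (ns - ne) = none →
        ∃ ei', pvScanA sd ed cs i ns ne ei =
          (ns + (cs.countP (fun c => [c] == sd) : Int), ne + (cs.countP (fun c => [c] == ed) : Int), ei')) := by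
  intro cs
  induction cs with
  | nil =>
    intro i ns ne ei hlt
    constructor
    · intro j hj; simp [pvClosingIdx] at hj
    · intro _; exact ⟨ei, by simp [pvScanA]⟩
  | cons c cs ih =>
    intro i ns ne ei hlt
    unfold pvClosingIdx pvScanA
    simp only [List.countP_cons, beq_iff_eq]
    by_cases hs : [c] = sd
    · have h2 : ¬ [c] = ed := fun h2 => h (hs ▸ h2 ▸ rfl)
      rw [if_pos hs, if_pos hs]
      have heq : ¬ ((ns + 1, ne, ei).1 = (ns + 1, ne, ei).2.1) := by simp; omega
      rw [if_neg heq]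
      have harith : ns - ne + 1 = (ns + 1) - ne := by ring
      rw [harith]
      obtain ⟨IH1, IH2⟩ := ih (i+1) (ns+1) ne ei (by omega)
      refine ⟨fun j hj => IH1 j hj, fun hn => ?_⟩
      obtain ⟨ei', hei⟩ := IH2 hn
      refine ⟨ei', ?_⟩
      rw [hei]
      simp only [Prod.mk.injEq, decide_eq_true_eq, if_pos hs]
      refine ⟨by push_cast; ring, ?_, trivial⟩
      rw [if_neg h2]; push_cast; ring
    · rw [if_neg hs, if_neg hs]
      by_cases he : [c] = ed
      · rw [if_pos he, if_pos he]
        by_cases hd1 : ns - ne - 1 = 0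
        · have heq : (ns, ne + 1, i).1 = (ns, ne + 1, i).2.1 := by simp; omega
          rw [if_pos hd1, if_pos heq]
          refine ⟨fun j hj => ?_, fun hn => by cases hn⟩
          simp only [Option.some.injEq] at hj
          refine ⟨ns, ?_⟩
          have : ne + 1 = ns := by omega
          rw [← hj, this]
        · have heq : ¬ ((ns, ne + 1, i).1 = (ns, ne + 1, i).2.1) := by simp; omega
          rw [if_neg hd1, if_neg heq]
          have harith : ns - ne - 1 = ns - (ne + 1) := by ring
          rw [harith]
          obtain ⟨IH1, IH2⟩ := ih (i+1) ns (ne+1) i (by omega)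
          refine ⟨fun j hj => IH1 j hj, fun hn => ?_⟩
          obtain ⟨ei', hei⟩ := IH2 hn
          refine ⟨ei', ?_⟩
          rw [hei]
          simp only [Prod.mk.injEq, decide_eq_true_eq, if_neg hs, if_pos he]
          refine ⟨by push_cast; ring, by push_cast; ring, trivial⟩
      · rw [if_neg he, if_neg he]
        have heq : ¬ ((ns, ne, ei).1 = (ns, ne, ei).2.1) := by simp; omega
        rw [if_neg heq]
        obtain ⟨IH1, IH2⟩ := ih (i+1) ns ne ei (by omega)
        refine ⟨fun j hj => IH1 j hj, fun hn => ?_⟩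
        obtain ⟨ei', hei⟩ := IH2 hn
        refine ⟨ei', ?_⟩
        rw [hei]
        simp only [Prod.mk.injEq, decide_eq_true_eq, if_neg hs, if_neg he]
        refine ⟨by push_cast; ring, by push_cast; ring, trivial⟩

theorem loopA_fst_ge (linesC : List (List Char)) (sd ed : List Char) :
    ∀ (fuel : Nat) (n ns ne ei : Int), n ≤ (pvLoopA linesC sd ed fuel n ns ne ei).1 := by
  intro fuel
  induction fuel with
  | zero => intro n ns ne ei; simp [pvLoopA]
  | succ fuel ih =>
    intro n ns ne ei
    by_cases hc : ne < ns
    · simp only [pvLoopA, if_pos hc]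
      have := ih (n+1) (pvScanA sd ed ((PySem.List.pyGet? linesC (n + 1)).getD []) 0 ns ne ei).1
        (pvScanA sd ed ((PySem.List.pyGet? linesC (n + 1)).getD []) 0 ns ne ei).2.1
        (pvScanA sd ed ((PySem.List.pyGet? linesC (n + 1)).getD []) 0 ns ne ei).2.2
      omega
    · simp [pvLoopA, if_neg hc]

theorem loopA_exit (linesC : List (List Char)) (sd ed : List Char) (fuel : Nat) (n m ei : Int) :
    pvLoopA linesC sd ed fuel n m m ei = (n, ei) := by
  cases fuel <;> simp [pvLoopA]

theorem loopA_noenter (linesC : List (List Char)) (sd ed : List Char) (fuel : Nat) (n ns ne ei : Int)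
    (h : ¬ ne < ns) : pvLoopA linesC sd ed fuel n ns ne ei = (n, ei) := by
  cases fuel <;> simp [pvLoopA, h]

theorem loopB_noenter (linesC : List (List Char)) (sd ed : List Char) (fuel : Nat) (n d : Int)
    (acc : List Char) (h : ¬ 0 < d) : pvLoopB linesC sd ed fuel n d acc = acc := by
  cases fuel <;> simp [pvLoopB, h]

theorem next_line_exists (linesC : List (List Char)) (sd ed : List Char) (n : Nat) (d : Int)
    (hd : 1 ≤ d)
    (H : ∃ p ≤ ((linesC.drop (n+1)).flatten).length, d ≤ pvBal sd ed (((linesC.drop (n+1)).flatten).take p)) :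
    n + 1 < linesC.length := by
  by_contra hlen
  have : linesC.drop (n+1) = [] := List.drop_eq_nil_of_le (by omega)
  obtain ⟨p, hp, hbal⟩ := H
  rw [this] at hp hbal
  simp at hp
  subst hp
  simp [pvBal] at hbal
  omega

theorem loop_sim (linesC : List (List Char)) (sd ed : List Char) (hsd : sd ≠ ed) :
    ∀ (fuel : Nat) (n : Nat) (z : Int) (ns ne ei : Int) (acc : List Char),
      (z = (n : Int) ∨ z = (n : Int) - linesC.length) → ne < ns →
      (∃ p ≤ ((linesC.drop (n+1)).flatten).length, ns - ne ≤ pvBal sd ed (((linesC.drop (n+1)).flatten).take p)) →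
      linesC.length ≤ n + 1 + fuel →
      pvMid linesC (z+1) (pvLoopA linesC sd ed fuel z ns ne ei).1 acc ++
        PySem.Chars.slice ((PySem.List.pyGet? linesC (pvLoopA linesC sd ed fuel z ns ne ei).1).getD []) none (some (pvLoopA linesC sd ed fuel z ns ne ei).2)
      = pvLoopB linesC sd ed fuel z (ns - ne) acc := by
  intro fuel
  induction fuel with
  | zero =>
    intro n z ns ne ei acc hzn hlt H hfuel
    have := next_line_exists linesC sd ed n (ns - ne) (by omega) H
    omega
  | succ fuel ih =>
    intro n z ns ne ei acc hzn hlt H hfuel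
    have hnext : n + 1 < linesC.length := next_line_exists linesC sd ed n (ns - ne) (by omega) H
    have hline : (PySem.List.pyGet? linesC (z + 1)).getD [] = linesC[n+1] := by
      rcases hzn with hz | hz
      · have hcast : z + 1 = ((n + 1 : Nat) : Int) := by omega
        rw [hcast, PySem.List.pyGet?_natCast]
        simp [List.getElem?_eq_getElem hnext]
      · have hk : z + 1 = -((linesC.length - (n+1) : Nat) : Int) := by
          push_cast; omega
        rw [hk, PySem.List.pyGet?_neg_natCast linesC (linesC.length - (n+1)) (by omega) (by omega)]
        have : linesC.length - (linesC.length - (n+1)) = n + 1 := by omega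
        rw [this]
        simp [List.getElem?_eq_getElem hnext]
    have hzn' : z + 1 = ((n+1 : Nat) : Int) ∨ z + 1 = ((n+1 : Nat) : Int) - linesC.length := by
      rcases hzn with hz | hz
      · left; omega
      · right; omega
    have hd : 0 < ns - ne := by omega
    cases hcl : pvClosingIdx sd ed (linesC[n+1]) 0 (ns - ne) with
    | some j =>
      obtain ⟨m, hm⟩ := (scan_close sd ed hsd (linesC[n+1]) 0 ns ne ei hlt).1 j hcl
      have hA : pvLoopA linesC sd ed (fuel+1) z ns ne ei = (z + 1, j) := by
        simp only [pvLoopA, if_pos hlt, hline, hm]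
        exact loopA_exit linesC sd ed fuel (z+1) m j
      rw [hA]
      have hB : pvLoopB linesC sd ed (fuel+1) z (ns - ne) acc
          = acc ++ PySem.Chars.slice (linesC[n+1]) none (some j) := by
        simp only [pvLoopB, if_pos hd, hline, hcl]
      rw [hB]
      have hmid : pvMid linesC (z+1) (z+1) acc = acc := by
        simp [pvMid, PySem.List.pyRange_one_eq_nil le_rfl]
      simp [hmid, hline]
    | none =>
      obtain ⟨ei', hscan⟩ := (scan_close sd ed hsd (linesC[n+1]) 0 ns ne ei hlt).2 hcl
      set cS := ((linesC[n+1]).countP (fun c => [c] == sd) : Int) with hcS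
      set cE := ((linesC[n+1]).countP (fun c => [c] == ed) : Int) with hcE
      have hball : pvBal sd ed (linesC[n+1]) = cE - cS := pvBal_countP sd ed hsd _
      have hprefix := close_none_bal sd ed (linesC[n+1]) 0 (ns - ne) (by omega) hcl
      have hfull : pvBal sd ed (linesC[n+1]) < ns - ne := by
        have := hprefix (linesC[n+1]).length le_rfl
        simpa using this
      have hd' : ne + cE < ns + cS := by omega
      have hdrop : linesC.drop (n+1) = linesC[n+1] :: linesC.drop (n+2) :=
        List.drop_eq_getElem_cons hnext
      have H' : ∃ p ≤ ((linesC.drop (n+2)).flatten).length,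
          (ns + cS) - (ne + cE) ≤ pvBal sd ed (((linesC.drop (n+2)).flatten).take p) := by
        obtain ⟨p, hp, hbal⟩ := H
        rw [hdrop, List.flatten_cons] at hp hbal
        simp only [List.length_append] at hp
        have hpgt : (linesC[n+1]).length < p := by
          by_contra hple
          push_neg at hple
          rw [List.take_append_of_le_length hple] at hbal
          have := hprefix p hple
          omega
        refine ⟨p - (linesC[n+1]).length, by omega, ?_⟩
        rw [List.take_append, List.take_of_length_le (by omega), pvBal_append] at hbal
        omega
      have hstepA : pvLoopA linesC sd ed (fuel+1) z ns ne ei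
          = pvLoopA linesC sd ed fuel (z+1) (ns + cS) (ne + cE) ei' := by
        simp only [pvLoopA, if_pos hlt, hline, hscan]
      have hgt : z + 1 < (pvLoopA linesC sd ed fuel (z+1) (ns + cS) (ne + cE) ei').1 := by
        have hnext2 : n + 2 < linesC.length := by
          have := next_line_exists linesC sd ed (n+1) ((ns + cS) - (ne + cE)) (by omega) H'
          omega
        cases fuel with
        | zero => omega
        | succ g =>
          simp only [pvLoopA, if_pos hd']
          have := loopA_fst_ge linesC sd ed g (z+1+1)
            (pvScanA sd ed ((PySem.List.pyGet? linesC (z+1+1)).getD []) 0 (ns+cS) (ne+cE) ei').1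
            (pvScanA sd ed ((PySem.List.pyGet? linesC (z+1+1)).getD []) 0 (ns+cS) (ne+cE) ei').2.1
            (pvScanA sd ed ((PySem.List.pyGet? linesC (z+1+1)).getD []) 0 (ns+cS) (ne+cE) ei').2.2
          omega
      have hmid : ∀ b : Int, z + 1 < b → ∀ a,
          pvMid linesC (z+1) b a = pvMid linesC (z+1+1) b (a ++ ' ' :: PySem.Chars.strip (linesC[n+1])) := by
        intro b hb a
        unfold pvMid
        rw [PySem.List.pyRange_one_cons hb]
        simp [hline]
      have hIH := ih (n+1) (z+1) (ns + cS) (ne + cE) ei' (acc ++ ' ' :: PySem.Chars.strip (linesC[n+1])) hzn' hd' H' (by omega)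
      rw [hstepA]
      rw [hmid _ hgt acc]
      have harith : (ns + cS) - (ne + cE) = ns - ne + (cS - cE) := by ring
      rw [harith] at hIH
      rw [hIH]
      have hB : pvLoopB linesC sd ed (fuel+1) z (ns - ne) acc
          = pvLoopB linesC sd ed fuel (z+1) (ns - ne + (cS - cE)) (acc ++ ' ' :: PySem.Chars.strip (linesC[n+1])) := by
        simp only [pvLoopB, if_pos hd, hline, hcl]
        rfl
      rw [hB]

-- ===== VERDICT (by name: the statement is the Claim_ definition above) =====
theorem extract_multiple_lines_spec : Claim_equal_extract_multiple_lines := by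
  intro lines ln sd ed _ hpre
  unfold Spec_extract_multiple_lines
  obtain ⟨h0, h1, h2⟩ := hpre
  simp only [extract_multiple_lines, extract_multiple_lines_alt]
  set linesC := lines.map String.toList with hlC
  have hlen : linesC.length = lines.length := by simp [hlC]
  set n := (if ln < 0 then ln + lines.length else ln).toNat with hn
  have hnlt : n < linesC.length := by rw [hlen]; omega
  have hzn : ln = (n : Int) ∨ ln = (n : Int) - linesC.length := by
    rw [hlen]
    by_cases hneg : ln < 0
    · right; simp [hn, if_pos hneg]; omega
    · left; simp [hn, if_neg hneg]; omega
  have hline0 : (PySem.List.pyGet? linesC ln).getD [] = linesC[n] := by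
    rcases hzn with hz | hz
    · rw [hz, PySem.List.pyGet?_natCast]
      simp [List.getElem?_eq_getElem hnlt]
    · have hk : ln = -((linesC.length - n : Nat) : Int) := by push_cast; omega
      rw [hk, PySem.List.pyGet?_neg_natCast linesC (linesC.length - n) (by omega) (by omega)]
      have : linesC.length - (linesC.length - n) = n := by omega
      rw [this]
      simp [List.getElem?_eq_getElem hnlt]
  have hlineD : linesC.getD n [] = linesC[n] := by
    simp [List.getD, List.getElem?_eq_getElem hnlt]
  simp only [hlineD] at h2
  rw [hline0]
  set sd' := sd.toList with hsd'
  set ed' := ed.toList with hed'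
  set ns : Int := (PySem.Chars.count (linesC[n]) sd' : Int) with hns
  set ne : Int := (PySem.Chars.count (linesC[n]) ed' : Int) with hne
  by_cases hd0 : ns - ne ≤ 0
  · have hnlt' : ¬ ne < ns := by omega
    rw [loopA_noenter linesC sd' ed' linesC.length ln ns ne 0 hnlt']
    rw [loopB_noenter linesC sd' ed' linesC.length ln (ns - ne) _ (by omega)]
    have hrange : PySem.List.pyRange (ln + 1) ln 1 = [] :=
      PySem.List.pyRange_one_eq_nil (by omega)
    rw [hrange]
    have h00 : PySem.List.slice (linesC[n]) none (some (0:Int)) = [] := by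
      simp [pysem]
    simp [hline0, h00]
  · have hlt : ne < ns := by omega
    have hsdne : sd' ≠ ed' := by
      intro hEq
      rw [hns, hne, hEq] at hd0
      omega
    have H : ∃ p ≤ ((linesC.drop (n+1)).flatten).length,
        ns - ne ≤ pvBal sd' ed' (((linesC.drop (n+1)).flatten).take p) := by
      rcases h2 with h2 | ⟨p, hp, hbal⟩
      · omega
      · exact ⟨p, by simpa [List.mem_range, Nat.lt_succ_iff] using hp, hbal⟩
    have hsim := loop_sim linesC sd' ed' hsdne linesC.length n ln ns ne 0
      (PySem.Chars.strip (PySem.Chars.slice (linesC[n])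
        (some (PySem.Chars.find (linesC[n]) sd' + 1)) none))
      hzn hlt H (by omega)
    simp only [pvMid] at hsim
    exact congrArg (fun t => String.ofList (PySem.Chars.strip t)) hsim
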